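-- pv_equiv track=rewrite | github.com/aanasakhtar/CI_Project | HPMOCD/mcmoea.py | _hard_partition
-- ===== SOURCE A (Python) =====
-- from collections import Counter
-- from typing import Hashable
--
-- Node = Hashable
--
-- Individual = dict[Node, set[int]]
--
-- def _hard_partition(individual: Individual, neighbors: dict[Node, list[Node]]) -> list[frozenset]:
--     chosen: dict[Node, int] = {}
--     for node, labels in individual.items():
--         if len(labels) == 1:
--             chosen[node] = next(iter(labels))
--             continue
--
--         support = Counter()
--         for nbr in neighbors[node]:
--             support.update(individual[nbr])
--         chosen[node] = max(labels, key=lambda label: (support[label], -label))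
--
--     groups: dict[int, set[Node]] = {}
--     for node, label in chosen.items():
--         groups.setdefault(label, set()).add(node)
--     return [frozenset(nodes) for _label, nodes in sorted(groups.items()) if nodes]
-- ===== SOURCE B (Python) =====
-- def _hard_partition(individual, neighbors):
--     chosen = {}
--     for node, labels in individual.items():
--         if len(labels) == 1:
--             chosen[node] = next(iter(labels))
--             continue
--         best = None
--         for label in labels:
--             support = sum(1 for nbr in neighbors[node] if label in individual[nbr])
--             key = (support, -label)
--             if best is None or key > best[0]:
--                 best = (key, label)
--         chosen[node] = best[1]
--     labels_sorted = sorted(set(chosen.values()))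
--     return [frozenset(n for n in chosen if chosen[n] == lab) for lab in labels_sorted]
-- ===== Notes on version B (the rewrite author's own statement) =====
-- stated objective: alternative
-- what changed: Per node, B drops the Counter that scatters all neighbour labels into an accumulator and instead counts each candidate label's support directly by membership over the neighbour list (reversed loop nesting), tracking a running best instead of calling max; grouping replaces the dict-of-sets + setdefault pipeline by sorting the distinct chosen labels once and filtering the chosen items per label.
import Mathlib
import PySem

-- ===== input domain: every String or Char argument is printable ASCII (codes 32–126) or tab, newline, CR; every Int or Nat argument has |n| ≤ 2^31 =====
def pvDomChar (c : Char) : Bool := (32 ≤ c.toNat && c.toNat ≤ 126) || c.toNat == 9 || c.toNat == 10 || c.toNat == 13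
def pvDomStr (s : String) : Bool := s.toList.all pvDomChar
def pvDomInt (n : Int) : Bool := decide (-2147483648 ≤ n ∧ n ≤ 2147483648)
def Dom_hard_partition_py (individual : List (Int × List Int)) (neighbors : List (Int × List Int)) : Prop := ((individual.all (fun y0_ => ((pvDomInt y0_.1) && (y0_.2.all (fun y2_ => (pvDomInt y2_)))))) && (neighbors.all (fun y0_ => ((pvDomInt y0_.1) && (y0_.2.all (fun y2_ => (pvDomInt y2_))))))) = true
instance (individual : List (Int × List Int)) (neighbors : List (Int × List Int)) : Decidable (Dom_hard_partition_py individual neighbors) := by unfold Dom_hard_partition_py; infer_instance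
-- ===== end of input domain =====

-- B replaces A's per-node Counter scatter by a per-candidate-label membership count and the
-- dict-of-sets grouping by a sorted-distinct-labels scan (objective: alternative decomposition,
-- same cost class). Equivalence of the RETURN value on all inputs where the Python A returns.

-- ===== PORT A =====
-- Literal transliteration of A.  dicts are read via PySem.Dict.ofList (last value wins, first
-- position kept), set-valued entries via PySem.Set.ofList.  next(iter(labels)) is taken on a
-- singleton set only (guarded by len == 1), where it is exact (headD).  max(labels, key=(support,
-- -label)) is PySem.List.max2?; the key is injective on the set (second component), so the unmodelled
-- set iteration order cannot affect it.  sorted(groups.items()) compares pairs whose first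
-- components are distinct dict keys, so it is sorted with key = first component.
def hard_partition_py (individual : List (Int × List Int)) (neighbors : List (Int × List Int)) : List (List Int) :=
  let indD := PySem.Dict.ofList individual
  let nbrD := PySem.Dict.ofList neighbors
  let chosen : PySem.Dict Int Int :=
    indD.items.foldl (fun chosen p =>
      let labels : PySem.Set Int := PySem.Set.ofList p.2
      if labels.length = 1 then
        chosen.insert p.1 (labels.headD 0)
      else
        let support : PySem.Dict Int Int :=
          (nbrD.getD p.1 []).foldl (fun s nbr =>
            (PySem.Set.ofList (indD.getD nbr [])).foldl (fun s l => s.modify l 0 (· + 1)) s)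
            PySem.Dict.empty
        chosen.insert p.1
          ((PySem.List.max2? labels (fun l => support.getD l 0) (fun l => -l)).getD 0))
      PySem.Dict.empty
  let groups : PySem.Dict Int (List Int) :=
    chosen.items.foldl (fun g q => g.modify q.2 [] (fun s => PySem.Set.add s q.1)) PySem.Dict.empty
  ((PySem.List.sorted groups.items (fun q => q.1)).filter (fun q => !q.2.isEmpty)).map (fun q => q.2)

-- ===== PORT B =====
-- Literal transliteration of B (Source B): running best over the node's own candidate labels, support
-- counted by membership over the neighbour list (sum of a 0/1 generator = countP); grouping by
-- sorted distinct chosen labels and a filter over chosen's items.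
def hard_partition_py_alt (individual : List (Int × List Int)) (neighbors : List (Int × List Int)) : List (List Int) :=
  let indD := PySem.Dict.ofList individual
  let nbrD := PySem.Dict.ofList neighbors
  let chosen : PySem.Dict Int Int :=
    indD.items.foldl (fun chosen p =>
      let labels : PySem.Set Int := PySem.Set.ofList p.2
      if labels.length = 1 then
        chosen.insert p.1 (labels.headD 0)
      else
        let best : Option ((Int × Int) × Int) :=
          labels.foldl (fun best label =>
            let support : Int :=
              ((nbrD.getD p.1 []).countP
                 (fun nbr => PySem.Set.contains (PySem.Set.ofList (indD.getD nbr [])) label) : Nat)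
            match best with
            | none => some ((support, -label), label)
            | some (bk, bl) =>
                if bk.1 < support ∨ (bk.1 = support ∧ bk.2 < -label) then
                  some ((support, -label), label)
                else some (bk, bl)) none
        chosen.insert p.1 ((best.map (·.2)).getD 0))
      PySem.Dict.empty
  let labs := PySem.List.sorted (PySem.Set.ofList chosen.values) (fun x => x)
  labs.map (fun lab => (chosen.items.filter (fun q => q.2 == lab)).map (fun q => q.1))

-- ===== PRECONDITION & SPEC =====
-- Pre_ excludes exactly the inputs on which the Python A raises: a node whose label set is not a
-- singleton must appear in neighbors (else KeyError), all its listed neighbours must appear in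
-- individual (else KeyError), and its label set must be nonempty (else max() raises ValueError).
def Pre_hard_partition_py (individual : List (Int × List Int)) (neighbors : List (Int × List Int)) : Prop :=
  ∀ p ∈ (PySem.Dict.ofList individual).items,
    (PySem.Set.ofList p.2).length ≠ 1 →
      ((PySem.Dict.ofList neighbors).contains p.1 = true ∧
       (∀ nbr ∈ (PySem.Dict.ofList neighbors).getD p.1 [],
          (PySem.Dict.ofList individual).contains nbr = true) ∧
       p.2 ≠ [])
instance (individual : List (Int × List Int)) (neighbors : List (Int × List Int)) : Decidable (Pre_hard_partition_py individual neighbors) := by unfold Pre_hard_partition_py; infer_instance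

def pvWitness_hard_partition_py : (List (Int × List Int)) × (List (Int × List Int)) :=
  ([(1, [2, 3]), (2, [2])], [(1, [2]), (2, [])])

def Spec_hard_partition_py (individual : List (Int × List Int)) (neighbors : List (Int × List Int)) (out : List (List Int)) : Prop := out = hard_partition_py_alt individual neighbors
instance (individual : List (Int × List Int)) (neighbors : List (Int × List Int)) (out : List (List Int)) : Decidable (Spec_hard_partition_py individual neighbors out) := by unfold Spec_hard_partition_py; infer_instance

-- ===== CLAIM (what is proved, stated in full; the proofs are below) =====
def Claim_equal_hard_partition_py : Prop := ∀ (individual : List (Int × List Int)) (neighbors : List (Int × List Int)), Dom_hard_partition_py individual neighbors → Pre_hard_partition_py individual neighbors → Spec_hard_partition_py individual neighbors (hard_partition_py individual neighbors)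

-- ===== LEMMAS AND PROOFS =====

-- A's nested Counter-update loop, looked up at v, counts the neighbours whose label set contains v.
theorem pv_support_eq (g : Int → List Int) (v : Int) :
    ∀ (nbrs : List Int) (d : PySem.Dict Int Int),
      (nbrs.foldl (fun s nbr =>
          (PySem.Set.ofList (g nbr)).foldl (fun s l => s.modify l 0 (· + 1)) s) d).getD v 0
        = d.getD v 0 + (nbrs.countP (fun nbr => PySem.Set.contains (PySem.Set.ofList (g nbr)) v) : Nat) := by
  intro nbrs
  induction nbrs with
  | nil => intro d; simp
  | cons n t ih =>
    intro d
    rw [List.foldl_cons, ih, PySem.Dict.getD_foldl_modify_add_one, List.countP_cons]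
    have hnd : (PySem.Set.ofList (g n)).Nodup := PySem.Set.nodup_ofList _
    by_cases hv : v ∈ PySem.Set.ofList (g n)
    · rw [List.count_eq_one_of_mem hnd hv]
      have hc : PySem.Set.contains (PySem.Set.ofList (g n)) v = true := by simpa using hv
      rw [hc]
      simp
      omega
    · rw [List.count_eq_zero_of_not_mem hv]
      have hc : PySem.Set.contains (PySem.Set.ofList (g n)) v = false := by simpa using hv
      rw [hc]
      simp

-- B's running-best fold carries (key, element); dropping the key gives A's max2? fold.
theorem pv_best_eq_aux (k1 k2 : Int → Int) :
    ∀ (t : List Int) (m : Int),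
      (t.foldl (fun best label =>
          match best with
          | none => some ((k1 label, k2 label), label)
          | some (bk, bl) =>
              if bk.1 < k1 label ∨ (bk.1 = k1 label ∧ bk.2 < k2 label) then
                some ((k1 label, k2 label), label)
              else some (bk, bl)) (some ((k1 m, k2 m), m))).map (·.2)
        = PySem.List.max2? (m :: t) k1 k2 := by
  intro t
  induction t with
  | nil => intro m; simp [PySem.List.max2?]
  | cons x t ih =>
    intro m
    rw [List.foldl_cons]
    rw [show (match some ((k1 m, k2 m), m) with
          | none => some ((k1 x, k2 x), x)
          | some (bk, bl) =>
              if bk.1 < k1 x ∨ (bk.1 = k1 x ∧ bk.2 < k2 x) then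
                some ((k1 x, k2 x), x)
              else some (bk, bl))
        = if (k1 m, k2 m).1 < k1 x ∨ ((k1 m, k2 m).1 = k1 x ∧ (k1 m, k2 m).2 < k2 x) then
            some ((k1 x, k2 x), x) else some ((k1 m, k2 m), m) from rfl]
    by_cases h : k1 m < k1 x ∨ (k1 m = k1 x ∧ k2 m < k2 x)
    · have h1 : ((decide (k1 m < k1 x) || !decide (k1 x < k1 m) && decide (k2 m < k2 x)) = true) := by
        simp only [Bool.or_eq_true, Bool.and_eq_true, Bool.not_eq_true', decide_eq_true_eq,
          decide_eq_false_iff_not]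
        omega
      have hr : PySem.List.max2? (m :: x :: t) k1 k2 = PySem.List.max2? (x :: t) k1 k2 := by
        simp only [PySem.List.max2?, List.foldl_cons, h1]
        simp
      rw [if_pos h, hr]
      exact ih x
    · have h1 : ¬ ((decide (k1 m < k1 x) || !decide (k1 x < k1 m) && decide (k2 m < k2 x)) = true) := by
        simp only [Bool.or_eq_true, Bool.and_eq_true, Bool.not_eq_true', decide_eq_true_eq,
          decide_eq_false_iff_not]
        omega
      have h2 := Bool.eq_false_iff.mpr h1
      have hr : PySem.List.max2? (m :: x :: t) k1 k2 = PySem.List.max2? (m :: t) k1 k2 := by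
        simp only [PySem.List.max2?, List.foldl_cons, h2]
        simp
      rw [if_neg h, hr]
      exact ih m

theorem pv_best_eq (xs : List Int) (k1 k2 : Int → Int) :
    (xs.foldl (fun best label =>
        match best with
        | none => some ((k1 label, k2 label), label)
        | some (bk, bl) =>
            if bk.1 < k1 label ∨ (bk.1 = k1 label ∧ bk.2 < k2 label) then
              some ((k1 label, k2 label), label)
            else some (bk, bl)) none).map (·.2)
      = PySem.List.max2? xs k1 k2 := by
  cases xs with
  | nil => simp [PySem.List.max2?]
  | cons x t => rw [List.foldl_cons]; exact pv_best_eq_aux k1 k2 t x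

-- The grouping dict built by modify/Set.add over pairs with distinct first components,
-- characterised: labels in first-occurrence order, each with its members in order.
theorem pv_groups_items_aux (L : List (Int × Int)) (hnd : (L.map (·.1)).Nodup) :
    (L.foldl (fun g q => PySem.Dict.insert g q.2 (PySem.Set.add (PySem.Dict.getD g q.2 []) q.1))
        PySem.Dict.empty).items
      = (PySem.Set.ofList (L.map (·.2))).map
          (fun lab => (lab, (L.filter (fun q => q.2 == lab)).map (fun q => q.1))) := by
  induction L using List.reverseRecOn with
  | nil => rfl
  | append_singleton L q ih =>
    have hndL : (L.map (·.1)).Nodup := by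
      simpa using (List.nodup_append.mp (by simpa using hnd)).1
    have hq1 : q.1 ∉ L.map (·.1) := by
      have := (List.nodup_append.mp (by simpa using hnd)).2.2
      simp at this ⊢
      intro a b; exact this q.1 a b rfl
    have hitems := ih hndL
    set S := PySem.Set.ofList (L.map (·.2)) with hS
    have hkeys : (L.foldl (fun g q => PySem.Dict.insert g q.2 (PySem.Set.add (PySem.Dict.getD g q.2 []) q.1))
        PySem.Dict.empty).keys = S := by
      simp only [PySem.Dict.keys]
      rw [hitems]
      simp [List.map_map, Function.comp_def]
    have hkeysnd : (L.foldl (fun g q => PySem.Dict.insert g q.2 (PySem.Set.add (PySem.Dict.getD g q.2 []) q.1))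
        PySem.Dict.empty).keys.Nodup := by
      rw [hkeys]; exact PySem.Set.nodup_ofList _
    rw [List.foldl_append, List.foldl_cons, List.foldl_nil]
    have hq1b : ∀ lab : Int, q.1 ∉ (L.filter (fun r => r.2 == lab)).map (fun r => r.1) := by
      intro lab hmem
      apply hq1
      rcases List.mem_map.mp hmem with ⟨r, hr, hrx⟩
      exact List.mem_map.mpr ⟨r, (List.mem_filter.mp hr).1, hrx⟩
    by_cases hq2 : q.2 ∈ S
    · have hcont : (L.foldl (fun g q => PySem.Dict.insert g q.2 (PySem.Set.add (PySem.Dict.getD g q.2 []) q.1)) PySem.Dict.empty).contains q.2 = true := by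
        rw [PySem.Dict.contains_eq_decide_mem_keys, hkeys]
        simpa using hq2
      have hmem : (q.2, (L.filter (fun r => r.2 == q.2)).map (fun r => r.1)) ∈
          (L.foldl (fun g q => PySem.Dict.insert g q.2 (PySem.Set.add (PySem.Dict.getD g q.2 []) q.1)) PySem.Dict.empty).items := by
        rw [hitems]
        exact List.mem_map_of_mem hq2
      have hgetD : (L.foldl (fun g q => PySem.Dict.insert g q.2 (PySem.Set.add (PySem.Dict.getD g q.2 []) q.1)) PySem.Dict.empty).getD q.2 []
          = (L.filter (fun r => r.2 == q.2)).map (fun r => r.1) :=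
        PySem.Dict.getD_of_mem_items _ hmem hkeysnd []
      have hlabels : PySem.Set.ofList ((L ++ [q]).map (·.2)) = S := by
        simp only [List.map_append, List.map_cons, List.map_nil]
        rw [PySem.Set.ofList_append_singleton]
        exact PySem.Set.add_of_mem hq2
      rw [hgetD, PySem.Dict.items_insert_of_contains _ _ hcont, hitems, hlabels, List.map_map]
      apply List.map_congr_left
      intro lab hlab
      by_cases hl : lab = q.2
      · subst hl
        simp only [Function.comp_apply, beq_self_eq_true, if_true]
        rw [PySem.Set.add_of_not_mem (hq1b q.2)]
        simp [List.filter_append]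
      · have hbeq : (lab == q.2) = false := by simpa using hl
        have hbeq2 : (q.2 == lab) = false := by
          simpa using fun h => hl (h.symm)
        simp only [Function.comp_apply, hbeq, Bool.false_eq_true, if_false]
        simp [List.filter_append, hbeq2]
    · have hcont : (L.foldl (fun g q => PySem.Dict.insert g q.2 (PySem.Set.add (PySem.Dict.getD g q.2 []) q.1)) PySem.Dict.empty).contains q.2 = false := by
        rw [PySem.Dict.contains_eq_decide_mem_keys, hkeys]
        simpa using hq2
      have hlabels : PySem.Set.ofList ((L ++ [q]).map (·.2)) = S ++ [q.2] := by
        simp only [List.map_append, List.map_cons, List.map_nil]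
        rw [PySem.Set.ofList_append_singleton]
        exact PySem.Set.add_of_not_mem hq2
      have hfilnil : L.filter (fun r => r.2 == q.2) = [] := by
        apply List.filter_eq_nil_iff.mpr
        intro r hr hbeq
        exact hq2 (by rw [hS, PySem.Set.mem_ofList]; exact List.mem_map.mpr ⟨r, hr, by simpa using hbeq⟩)
      rw [PySem.Dict.getD_of_not_contains _ _ hcont, PySem.Dict.items_insert_of_not_contains _ _ hcont,
        hitems, hlabels, List.map_append]
      congr 1
      · apply List.map_congr_left
        intro lab hlab
        have hne : q.2 ≠ lab := fun h => hq2 (h ▸ hlab)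
        have hbeq2 : (q.2 == lab) = false := by simpa using hne
        simp [List.filter_append, hbeq2]
      · rw [PySem.Set.add_of_not_mem (by simp)]
        simp [List.filter_append, hfilnil]

theorem pv_groups_items (L : List (Int × Int)) (hnd : (L.map (·.1)).Nodup) :
    (L.foldl (fun g q => g.modify q.2 [] (fun s => PySem.Set.add s q.1)) PySem.Dict.empty).items
      = (PySem.Set.ofList (L.map (·.2))).map
          (fun lab => (lab, (L.filter (fun q => q.2 == lab)).map (fun q => q.1))) := by
  simp only [PySem.Dict.modify]
  exact pv_groups_items_aux L hnd

-- A's whole grouping pipeline (dict of sets, sorted items, drop empties) equals B's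
-- (sorted distinct labels, one filter per label).
theorem pv_grouping (L : List (Int × Int))
    (hitems : (L.foldl (fun g q => g.modify q.2 [] (fun s => PySem.Set.add s q.1)) PySem.Dict.empty).items
      = (PySem.Set.ofList (L.map (·.2))).map
          (fun lab => (lab, (L.filter (fun q => q.2 == lab)).map (fun q => q.1)))) :
    ((PySem.List.sorted ((L.foldl (fun g q => g.modify q.2 [] (fun s => PySem.Set.add s q.1)) PySem.Dict.empty).items) (fun q => q.1)).filter (fun q => !q.2.isEmpty)).map (fun q => q.2)
  = (PySem.List.sorted (PySem.Set.ofList (L.map (·.2))) (fun x => x)).map (fun lab => (L.filter (fun q => q.2 == lab)).map (fun q => q.1)) := by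
  set S := PySem.Set.ofList (L.map (·.2)) with hS
  set f := fun lab : Int => (lab, (L.filter (fun q => q.2 == lab)).map (fun q => q.1)) with hf
  have hsorted : PySem.List.sorted ((L.foldl (fun g q => g.modify q.2 [] (fun s => PySem.Set.add s q.1)) PySem.Dict.empty).items) (fun q => q.1)
      = (PySem.List.sorted S (fun x => x)).map f := by
    rw [hitems]
    apply PySem.List.sorted_eq_of_perm_of_pairwise_lt
    · exact List.Perm.map f (PySem.List.sorted_perm _ _ _)
    · have hp := PySem.List.sorted_ofList_pairwise_lt (L.map (·.2))
      rw [← hS] at hp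
      exact List.pairwise_map.mpr (by simpa using hp)
  rw [hsorted]
  have hfil : ((PySem.List.sorted S (fun x => x)).map f).filter (fun q => !q.2.isEmpty)
      = (PySem.List.sorted S (fun x => x)).map f := by
    apply List.filter_eq_self.mpr
    intro q hq
    rcases List.mem_map.mp hq with ⟨lab, hlab, rfl⟩
    have hlabS : lab ∈ S := (PySem.List.mem_sorted _ _ _ _).mp hlab
    have : lab ∈ L.map (·.2) := (PySem.Set.mem_ofList _ _).mp (hS ▸ hlabS)
    rcases List.mem_map.mp this with ⟨r, hr, hrl⟩
    simp only [hf, Bool.not_eq_eq_eq_not, Bool.not_true]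
    rw [List.isEmpty_eq_false_iff_exists_mem]
    exact ⟨r.1, List.mem_map.mpr ⟨r, List.mem_filter.mpr ⟨hr, by simpa using hrl⟩, rfl⟩⟩
  rw [hfil, List.map_map]
  rfl


-- Per-node choice: A's Counter+max2? value equals B's running-best value, for every node.
theorem pv_chosen_eq (individual neighbors : List (Int × List Int)) :
    (List.foldl
        (fun (chosen : PySem.Dict Int Int) (p : Int × List Int) =>
      if List.length (PySem.Set.ofList p.2) = 1 then
        chosen.insert p.1 (List.headD (PySem.Set.ofList p.2) 0)
      else
        chosen.insert p.1
          ((PySem.List.max2? (PySem.Set.ofList p.2)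
              (fun l =>
                (List.foldl
                    (fun (s : PySem.Dict Int Int) nbr =>
                      List.foldl (fun s l => s.modify l 0 fun x => x + 1) s
                        (PySem.Set.ofList ((PySem.Dict.ofList individual).getD nbr [])))
                    PySem.Dict.empty ((PySem.Dict.ofList neighbors).getD p.1 [])).getD l 0)
              (fun l => -l)).getD 0))
        PySem.Dict.empty (PySem.Dict.ofList individual).items)
    = (List.foldl
        (fun (chosen : PySem.Dict Int Int) (p : Int × List Int) =>
      if List.length (PySem.Set.ofList p.2) = 1 then
        chosen.insert p.1 (List.headD (PySem.Set.ofList p.2) 0)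
      else
        chosen.insert p.1
          ((Option.map (fun x => x.2)
              (List.foldl
                (fun (best : Option ((Int × Int) × Int)) label =>
                  match best with
                  | none => some ((((List.countP (fun nbr => (PySem.Set.ofList ((PySem.Dict.ofList individual).getD nbr [])).contains label) ((PySem.Dict.ofList neighbors).getD p.1 []) : Nat) : Int), -label), label)
                  | some (bk, bl) =>
                      if bk.1 < ((List.countP (fun nbr => (PySem.Set.ofList ((PySem.Dict.ofList individual).getD nbr [])).contains label) ((PySem.Dict.ofList neighbors).getD p.1 []) : Nat) : Int) ∨ (bk.1 = ((List.countP (fun nbr => (PySem.Set.ofList ((PySem.Dict.ofList individual).getD nbr [])).contains label) ((PySem.Dict.ofList neighbors).getD p.1 []) : Nat) : Int) ∧ bk.2 < -label) then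
                        some ((((List.countP (fun nbr => (PySem.Set.ofList ((PySem.Dict.ofList individual).getD nbr [])).contains label) ((PySem.Dict.ofList neighbors).getD p.1 []) : Nat) : Int), -label), label)
                      else some (bk, bl))
                none (PySem.Set.ofList p.2))).getD 0))
        PySem.Dict.empty (PySem.Dict.ofList individual).items) := by
  have h : ∀ (chosen : PySem.Dict Int Int) (p : Int × List Int),
      (fun (chosen : PySem.Dict Int Int) (p : Int × List Int) =>
      if List.length (PySem.Set.ofList p.2) = 1 then
        chosen.insert p.1 (List.headD (PySem.Set.ofList p.2) 0)
      else
        chosen.insert p.1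
          ((PySem.List.max2? (PySem.Set.ofList p.2)
              (fun l =>
                (List.foldl
                    (fun (s : PySem.Dict Int Int) nbr =>
                      List.foldl (fun s l => s.modify l 0 fun x => x + 1) s
                        (PySem.Set.ofList ((PySem.Dict.ofList individual).getD nbr [])))
                    PySem.Dict.empty ((PySem.Dict.ofList neighbors).getD p.1 [])).getD l 0)
              (fun l => -l)).getD 0)) chosen p = (fun (chosen : PySem.Dict Int Int) (p : Int × List Int) =>
      if List.length (PySem.Set.ofList p.2) = 1 then
        chosen.insert p.1 (List.headD (PySem.Set.ofList p.2) 0)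
      else
        chosen.insert p.1
          ((Option.map (fun x => x.2)
              (List.foldl
                (fun (best : Option ((Int × Int) × Int)) label =>
                  match best with
                  | none => some ((((List.countP (fun nbr => (PySem.Set.ofList ((PySem.Dict.ofList individual).getD nbr [])).contains label) ((PySem.Dict.ofList neighbors).getD p.1 []) : Nat) : Int), -label), label)
                  | some (bk, bl) =>
                      if bk.1 < ((List.countP (fun nbr => (PySem.Set.ofList ((PySem.Dict.ofList individual).getD nbr [])).contains label) ((PySem.Dict.ofList neighbors).getD p.1 []) : Nat) : Int) ∨ (bk.1 = ((List.countP (fun nbr => (PySem.Set.ofList ((PySem.Dict.ofList individual).getD nbr [])).contains label) ((PySem.Dict.ofList neighbors).getD p.1 []) : Nat) : Int) ∧ bk.2 < -label) then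
                        some ((((List.countP (fun nbr => (PySem.Set.ofList ((PySem.Dict.ofList individual).getD nbr [])).contains label) ((PySem.Dict.ofList neighbors).getD p.1 []) : Nat) : Int), -label), label)
                      else some (bk, bl))
                none (PySem.Set.ofList p.2))).getD 0)) chosen p := by
    intro chosen p
    simp only []
    by_cases h1 : List.length (PySem.Set.ofList p.2) = 1
    · rw [if_pos h1, if_pos h1]
    · rw [if_neg h1, if_neg h1]
      congr 1
      have hb := pv_best_eq (PySem.Set.ofList p.2)
        (fun label => ((List.countP (fun nbr => (PySem.Set.ofList ((PySem.Dict.ofList individual).getD nbr [])).contains label) ((PySem.Dict.ofList neighbors).getD p.1 []) : Nat) : Int))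
        (fun label => -label)
      simp only [] at hb
      rw [hb]
      have hk : (fun l : Int =>
          (List.foldl
              (fun (s : PySem.Dict Int Int) nbr =>
                List.foldl (fun s l => s.modify l 0 fun x => x + 1) s
                  (PySem.Set.ofList ((PySem.Dict.ofList individual).getD nbr [])))
              PySem.Dict.empty ((PySem.Dict.ofList neighbors).getD p.1 [])).getD l 0)
          = (fun label : Int => ((List.countP (fun nbr => (PySem.Set.ofList ((PySem.Dict.ofList individual).getD nbr [])).contains label) ((PySem.Dict.ofList neighbors).getD p.1 []) : Nat) : Int)) := by
        funext v
        rw [pv_support_eq (fun nbr => (PySem.Dict.ofList individual).getD nbr []) v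
          ((PySem.Dict.ofList neighbors).getD p.1 []) PySem.Dict.empty]
        simp
      exact congrArg
        (fun k : Int → Int => (PySem.List.max2? (PySem.Set.ofList p.2) k (fun l => -l)).getD 0) hk
  exact List.foldl_ext _ _ PySem.Dict.empty (fun acc b _ => h acc b)

-- ===== VERDICT (by name: the statement is the Claim_ definition above) =====
theorem hard_partition_py_spec : Claim_equal_hard_partition_py := by
  intro individual neighbors _dom _pre
  unfold Spec_hard_partition_py hard_partition_py hard_partition_py_alt
  simp only []
  rw [pv_chosen_eq individual neighbors]
  rw [show (fun (chosen : PySem.Dict Int Int) (p : Int × List Int) =>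
      if List.length (PySem.Set.ofList p.2) = 1 then
        chosen.insert p.1 (List.headD (PySem.Set.ofList p.2) 0)
      else
        chosen.insert p.1
          ((Option.map (fun x => x.2)
              (List.foldl
                (fun (best : Option ((Int × Int) × Int)) label =>
                  match best with
                  | none => some ((((List.countP (fun nbr => (PySem.Set.ofList ((PySem.Dict.ofList individual).getD nbr [])).contains label) ((PySem.Dict.ofList neighbors).getD p.1 []) : Nat) : Int), -label), label)
                  | some (bk, bl) =>
                      if bk.1 < ((List.countP (fun nbr => (PySem.Set.ofList ((PySem.Dict.ofList individual).getD nbr [])).contains label) ((PySem.Dict.ofList neighbors).getD p.1 []) : Nat) : Int) ∨ (bk.1 = ((List.countP (fun nbr => (PySem.Set.ofList ((PySem.Dict.ofList individual).getD nbr [])).contains label) ((PySem.Dict.ofList neighbors).getD p.1 []) : Nat) : Int) ∧ bk.2 < -label) then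
                        some ((((List.countP (fun nbr => (PySem.Set.ofList ((PySem.Dict.ofList individual).getD nbr [])).contains label) ((PySem.Dict.ofList neighbors).getD p.1 []) : Nat) : Int), -label), label)
                      else some (bk, bl))
                none (PySem.Set.ofList p.2))).getD 0))
      = (fun (chosen : PySem.Dict Int Int) (p : Int × List Int) =>
        chosen.insert p.1
          (if List.length (PySem.Set.ofList p.2) = 1 then
            List.headD (PySem.Set.ofList p.2) 0
          else
          ((Option.map (fun x => x.2)
              (List.foldl
                (fun (best : Option ((Int × Int) × Int)) label =>
                  match best with
                  | none => some ((((List.countP (fun nbr => (PySem.Set.ofList ((PySem.Dict.ofList individual).getD nbr [])).contains label) ((PySem.Dict.ofList neighbors).getD p.1 []) : Nat) : Int), -label), label)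
                  | some (bk, bl) =>
                      if bk.1 < ((List.countP (fun nbr => (PySem.Set.ofList ((PySem.Dict.ofList individual).getD nbr [])).contains label) ((PySem.Dict.ofList neighbors).getD p.1 []) : Nat) : Int) ∨ (bk.1 = ((List.countP (fun nbr => (PySem.Set.ofList ((PySem.Dict.ofList individual).getD nbr [])).contains label) ((PySem.Dict.ofList neighbors).getD p.1 []) : Nat) : Int) ∧ bk.2 < -label) then
                        some ((((List.countP (fun nbr => (PySem.Set.ofList ((PySem.Dict.ofList individual).getD nbr [])).contains label) ((PySem.Dict.ofList neighbors).getD p.1 []) : Nat) : Int), -label), label)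
                      else some (bk, bl))
                none (PySem.Set.ofList p.2))).getD 0))) by
    funext chosen p
    by_cases h1 : List.length (PySem.Set.ofList p.2) = 1
    · rw [if_pos h1, if_pos h1]
    · rw [if_neg h1, if_neg h1]]
  have hnd : ((List.foldl
      (fun (chosen : PySem.Dict Int Int) (p : Int × List Int) =>
        chosen.insert p.1
          (if List.length (PySem.Set.ofList p.2) = 1 then
            List.headD (PySem.Set.ofList p.2) 0
          else
          ((Option.map (fun x => x.2)
              (List.foldl
                (fun (best : Option ((Int × Int) × Int)) label =>
                  match best with
                  | none => some ((((List.countP (fun nbr => (PySem.Set.ofList ((PySem.Dict.ofList individual).getD nbr [])).contains label) ((PySem.Dict.ofList neighbors).getD p.1 []) : Nat) : Int), -label), label)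
                  | some (bk, bl) =>
                      if bk.1 < ((List.countP (fun nbr => (PySem.Set.ofList ((PySem.Dict.ofList individual).getD nbr [])).contains label) ((PySem.Dict.ofList neighbors).getD p.1 []) : Nat) : Int) ∨ (bk.1 = ((List.countP (fun nbr => (PySem.Set.ofList ((PySem.Dict.ofList individual).getD nbr [])).contains label) ((PySem.Dict.ofList neighbors).getD p.1 []) : Nat) : Int) ∧ bk.2 < -label) then
                        some ((((List.countP (fun nbr => (PySem.Set.ofList ((PySem.Dict.ofList individual).getD nbr [])).contains label) ((PySem.Dict.ofList neighbors).getD p.1 []) : Nat) : Int), -label), label)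
                      else some (bk, bl))
                none (PySem.Set.ofList p.2))).getD 0)))
      PySem.Dict.empty (PySem.Dict.ofList individual).items).items.map (fun x => x.1)).Nodup := by
    have h := PySem.Dict.nodup_keys_foldl_insert_key
      (PySem.Dict.ofList individual).items (fun p : Int × List Int => p.1)
      (fun (chosen : PySem.Dict Int Int) (p : Int × List Int) =>
          (if List.length (PySem.Set.ofList p.2) = 1 then
            List.headD (PySem.Set.ofList p.2) 0
          else
          ((Option.map (fun x => x.2)
              (List.foldl
                (fun (best : Option ((Int × Int) × Int)) label =>
                  match best with
                  | none => some ((((List.countP (fun nbr => (PySem.Set.ofList ((PySem.Dict.ofList individual).getD nbr [])).contains label) ((PySem.Dict.ofList neighbors).getD p.1 []) : Nat) : Int), -label), label)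
                  | some (bk, bl) =>
                      if bk.1 < ((List.countP (fun nbr => (PySem.Set.ofList ((PySem.Dict.ofList individual).getD nbr [])).contains label) ((PySem.Dict.ofList neighbors).getD p.1 []) : Nat) : Int) ∨ (bk.1 = ((List.countP (fun nbr => (PySem.Set.ofList ((PySem.Dict.ofList individual).getD nbr [])).contains label) ((PySem.Dict.ofList neighbors).getD p.1 []) : Nat) : Int) ∧ bk.2 < -label) then
                        some ((((List.countP (fun nbr => (PySem.Set.ofList ((PySem.Dict.ofList individual).getD nbr [])).contains label) ((PySem.Dict.ofList neighbors).getD p.1 []) : Nat) : Int), -label), label)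
                      else some (bk, bl))
                none (PySem.Set.ofList p.2))).getD 0)))
      PySem.Dict.empty (PySem.Dict.nodup_keys_empty)
    simp only [PySem.Dict.keys] at h
    exact h
  simp only [PySem.Dict.values]
  exact pv_grouping _ (pv_groups_items _ hnd)
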